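-- pv_equiv track=rewrite | github.com/FrankDuan/gwu | src/edu/gwu/cs6212/dynamic_programming/party_planning.py | plan_party
-- ===== SOURCE A (Python) =====
-- def plan_party(A):
--     length = len(A)
--     guests = [[] for _ in range(0, length)]
--     fun = [0 for _ in range(0, length)]
--     guests[0] = [0]
--     guests[1] = [0, 1]
--     guests[2] = [0, 1, 2]
--     fun[0] = 0
--     fun[1] = A[1]
--     fun[2] = A[1] + A[2]
--     max = 2
--     for i in range(3, length):
--         temp1 = fun[i-2] + A[i]
--         temp2 = fun[i-3] + A[i] + A[i-1]
--         if temp2 > temp1: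
--             fun[i] = temp2
--             guests[i] = guests[i-3] + [i-1, i]
--         else:
--             fun[i] = temp1
--             guests[i] = guests[i-2] + [i]
--
--         if fun[max] < fun[i]:
--             max = i
--
--     return fun[max], guests[max]
-- ===== SOURCE B (Python) =====
-- def plan_party(A):
--     # O(n): store a choice flag per index during the DP, backtrack once at the end.
--     n = len(A)
--     fun = [0, A[1], A[1] + A[2]]
--     take_pair = [False, False, False]
--     best = 2
--     for i in range(3, n):
--         t1 = fun[i - 2] + A[i]
--         t2 = fun[i - 3] + A[i] + A[i - 1]
--         if t2 > t1:
--             fun.append(t2)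
--             take_pair.append(True)
--         else:
--             fun.append(t1)
--             take_pair.append(False)
--         if fun[i] > fun[best]:
--             best = i
--     rev = []
--     i = best
--     while i >= 3:
--         if take_pair[i]:
--             rev.append(i)
--             rev.append(i - 1)
--             i -= 3
--         else:
--             rev.append(i)
--             i -= 2
--     base = [[0], [0, 1], [0, 1, 2]][i]
--     return fun[best], base + rev[::-1]
-- ===== Notes on version B (the rewrite author's own statement) =====
-- stated objective: faster
-- what changed: A copies a partial guest list into every DP cell (guests[i] = guests[i-2] + [i]), O(n^2) time/space; B stores one boolean choice flag per index during the DP and reconstructs the guest list with a single backtracking pass at the end.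
import Mathlib
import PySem

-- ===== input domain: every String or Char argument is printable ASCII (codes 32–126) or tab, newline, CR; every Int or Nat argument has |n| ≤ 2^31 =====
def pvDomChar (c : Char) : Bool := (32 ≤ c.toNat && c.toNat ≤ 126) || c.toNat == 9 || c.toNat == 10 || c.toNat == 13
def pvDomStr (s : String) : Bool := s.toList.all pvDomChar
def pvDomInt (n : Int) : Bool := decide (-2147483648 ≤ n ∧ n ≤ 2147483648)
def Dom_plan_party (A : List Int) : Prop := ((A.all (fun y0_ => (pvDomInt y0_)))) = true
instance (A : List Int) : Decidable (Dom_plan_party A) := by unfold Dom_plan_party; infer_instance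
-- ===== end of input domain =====

-- B replaces A's O(n^2) copying of partial guest lists by O(n) choice flags plus
-- one final backtracking pass that reconstructs the guest list.

-- ===== PORT A =====
-- Literal transliteration of A: preallocated `fun`/`guests` arrays written in place,
-- a fold over range(3, length), and a running argmax `max` starting at 2.
def plan_party (A : List Int) : Int × List Int :=
  let length := A.length
  let guests0 : List (List Int) :=
    (((List.replicate length ([] : List Int)).set 0 [0]).set 1 [0, 1]).set 2 [0, 1, 2]
  let fun0 : List Int :=
    (((List.replicate length (0 : Int)).set 0 0).set 1 (A.getD 1 0)).set 2
      (A.getD 1 0 + A.getD 2 0)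
  let st :=
    (PySem.List.pyRange 3 length).foldl
      (fun (s : List Int × List (List Int) × Nat) (iI : Int) =>
        let i := iI.toNat
        let fn := s.1
        let gs := s.2.1
        let mx := s.2.2
        let temp1 := fn.getD (i - 2) 0 + A.getD i 0
        let temp2 := fn.getD (i - 3) 0 + A.getD i 0 + A.getD (i - 1) 0
        let fg :=
          if temp2 > temp1 then
            (fn.set i temp2, gs.set i (gs.getD (i - 3) [] ++ [(i : Int) - 1, (i : Int)]))
          else
            (fn.set i temp1, gs.set i (gs.getD (i - 2) [] ++ [(i : Int)]))
        let mx' := if fg.1.getD mx 0 < fg.1.getD i 0 then i else mx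
        (fg.1, fg.2, mx'))
      (fun0, guests0, 2)
  (st.1.getD st.2.2 0, st.2.1.getD st.2.2 [])

-- ===== PORT B =====
-- B's while-loop: walk back from `best` following the stored flags, collecting indices.
def planPartyBacktrack (tp : List Bool) : Nat → List Int → Nat × List Int
  | i, rev =>
    if _h : 3 ≤ i then
      if tp.getD i false then
        planPartyBacktrack tp (i - 3) (rev ++ [(i : Int), (i : Int) - 1])
      else
        planPartyBacktrack tp (i - 2) (rev ++ [(i : Int)])
    else (i, rev)
  termination_by i _ => i
  decreasing_by all_goals omega

def plan_party_alt (A : List Int) : Int × List Int :=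
  let n := A.length
  let st :=
    (PySem.List.pyRange 3 n).foldl
      (fun (s : List Int × List Bool × Nat) (iI : Int) =>
        let i := iI.toNat
        let fn := s.1
        let tp := s.2.1
        let best := s.2.2
        let t1 := fn.getD (i - 2) 0 + A.getD i 0
        let t2 := fn.getD (i - 3) 0 + A.getD i 0 + A.getD (i - 1) 0
        let ft := if t2 > t1 then (fn ++ [t2], tp ++ [true]) else (fn ++ [t1], tp ++ [false])
        let best' := if ft.1.getD i 0 > ft.1.getD best 0 then i else best
        (ft.1, ft.2, best'))
      ([0, A.getD 1 0, A.getD 1 0 + A.getD 2 0], [false, false, false], 2)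
  let br := planPartyBacktrack st.2.1 st.2.2 []
  let base := ([[0], [0, 1], [0, 1, 2]] : List (List Int)).getD br.1 []
  (st.1.getD st.2.2 0, base ++ br.2.reverse)

-- ===== PRECONDITION & SPEC =====
-- A unconditionally writes/reads the first three cells of its arrays, so it raises
-- IndexError on lists with fewer than three elements; exactly those inputs are excluded.
def Pre_plan_party (A : List Int) : Prop := 3 ≤ A.length
instance (A : List Int) : Decidable (Pre_plan_party A) := by unfold Pre_plan_party; infer_instance
def pvWitness_plan_party : List Int := ([0, 5, -2])

def Spec_plan_party (A : List Int) (out : Int × List Int) : Prop := out = plan_party_alt A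
instance (A : List Int) (out : Int × List Int) : Decidable (Spec_plan_party A out) := by unfold Spec_plan_party; infer_instance

-- ===== CLAIM (what is proved, stated in full; the proofs are below) =====
def Claim_equal_plan_party : Prop := ∀ (A : List Int), Dom_plan_party A → Pre_plan_party A → Spec_plan_party A (plan_party A)

-- ===== LEMMAS AND PROOFS =====

-- Mathematical DP layer shared by both loop invariants.
def pF (A : List Int) : Nat → Int
  | 0 => 0
  | 1 => A.getD 1 0
  | 2 => A.getD 1 0 + A.getD 2 0
  | (i + 3) =>
      if pF A i + A.getD (i + 3) 0 + A.getD (i + 2) 0 > pF A (i + 1) + A.getD (i + 3) 0 then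
        pF A i + A.getD (i + 3) 0 + A.getD (i + 2) 0
      else pF A (i + 1) + A.getD (i + 3) 0

def pFlag (A : List Int) : Nat → Bool
  | (i + 3) => decide (pF A i + A.getD (i + 3) 0 + A.getD (i + 2) 0 > pF A (i + 1) + A.getD (i + 3) 0)
  | _ => false

def pG (A : List Int) : Nat → List Int
  | 0 => [0]
  | 1 => [0, 1]
  | 2 => [0, 1, 2]
  | (i + 3) =>
      if pFlag A (i + 3) then pG A i ++ [((i + 2 : Nat) : Int), ((i + 3 : Nat) : Int)]
      else pG A (i + 1) ++ [((i + 3 : Nat) : Int)]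

def pM (A : List Int) : Nat → Nat
  | 0 => 2
  | 1 => 2
  | 2 => 2
  | (i + 3) => if pF A (pM A (i + 2)) < pF A (i + 3) then i + 3 else pM A (i + 2)

lemma pM_bounds (A : List Int) : ∀ k, 2 ≤ pM A k ∧ pM A k ≤ max 2 k
  | 0 => by simp [pM]
  | 1 => by simp [pM]
  | 2 => by simp [pM]
  | (i + 3) => by
      have ih := pM_bounds A (i + 2)
      simp only [pM]
      split <;> omega

lemma pF_succ3 (A : List Int) (i : Nat) (h : 3 ≤ i) :
    pF A i = if pF A (i - 3) + A.getD i 0 + A.getD (i - 1) 0 > pF A (i - 2) + A.getD i 0 then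
        pF A (i - 3) + A.getD i 0 + A.getD (i - 1) 0
      else pF A (i - 2) + A.getD i 0 := by
  obtain ⟨m, rfl⟩ : ∃ m, i = m + 3 := ⟨i - 3, by omega⟩
  simp only [pF, Nat.add_sub_cancel, show m + 3 - 2 = m + 1 by omega, show m + 3 - 1 = m + 2 by omega]

lemma pM_succ3 (A : List Int) (i : Nat) (h : 3 ≤ i) :
    pM A i = if pF A (pM A (i - 1)) < pF A i then i else pM A (i - 1) := by
  obtain ⟨m, rfl⟩ : ∃ m, i = m + 3 := ⟨i - 3, by omega⟩
  simp only [pM, show m + 3 - 1 = m + 2 by omega]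

-- array shapes reached by the two loops
def fnArrA (A : List Int) (n k : Nat) : List Int :=
  (List.range n).map (fun j => if j < k then pF A j else 0)
def gsArrA (A : List Int) (n k : Nat) : List (List Int) :=
  (List.range n).map (fun j => if j < k then pG A j else [])

lemma fnArrA_getD (A : List Int) {n k j : Nat} (hj : j < k) (hn : j < n) :
    (fnArrA A n k).getD j 0 = pF A j := by
  rw [fnArrA, PySem.List.getD_map_range _ n j 0 hn]; simp [hj]

lemma gsArrA_getD (A : List Int) {n k j : Nat} (hj : j < k) (hn : j < n) :
    (gsArrA A n k).getD j [] = pG A j := by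
  rw [gsArrA, PySem.List.getD_map_range _ n j [] hn]; simp [hj]

lemma set_map_range {β : Type} (f : Nat → β) (n k : Nat) (v : β) (hk : k < n) :
    ((List.range n).map f).set k v
      = (List.range n).map (fun j => if j = k then v else f j) := by
  apply List.ext_getElem
  · simp
  · intro j h1 h2
    simp only [List.getElem_set, List.getElem_map, List.getElem_range]
    split_ifs <;> first | rfl | omega

lemma fnArrA_set (A : List Int) {n k : Nat} (hk : k < n) :
    (fnArrA A n k).set k (pF A k) = fnArrA A n (k + 1) := by
  rw [fnArrA, set_map_range _ n k _ hk, fnArrA]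
  apply List.map_congr_left
  intro j hj
  by_cases h : j = k
  · simp [h]
  · by_cases h2 : j < k <;> simp [h, h2] <;> intro h3 <;> omega

lemma gsArrA_set (A : List Int) {n k : Nat} (hk : k < n) :
    (gsArrA A n k).set k (pG A k) = gsArrA A n (k + 1) := by
  rw [gsArrA, set_map_range _ n k _ hk, gsArrA]
  apply List.map_congr_left
  intro j hj
  by_cases h : j = k
  · simp [h]
  · by_cases h2 : j < k <;> simp [h, h2] <;> intro h3 <;> omega

-- the loop bodies, named so the invariants can talk about them
def stepA (A : List Int) (s : List Int × List (List Int) × Nat) (iI : Int) :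
    List Int × List (List Int) × Nat :=
  let i := iI.toNat
  let fn := s.1
  let gs := s.2.1
  let mx := s.2.2
  let temp1 := fn.getD (i - 2) 0 + A.getD i 0
  let temp2 := fn.getD (i - 3) 0 + A.getD i 0 + A.getD (i - 1) 0
  let fg :=
    if temp2 > temp1 then
      (fn.set i temp2, gs.set i (gs.getD (i - 3) [] ++ [(i : Int) - 1, (i : Int)]))
    else
      (fn.set i temp1, gs.set i (gs.getD (i - 2) [] ++ [(i : Int)]))
  let mx' := if fg.1.getD mx 0 < fg.1.getD i 0 then i else mx
  (fg.1, fg.2, mx')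

def stepB (A : List Int) (s : List Int × List Bool × Nat) (iI : Int) :
    List Int × List Bool × Nat :=
  let i := iI.toNat
  let fn := s.1
  let tp := s.2.1
  let best := s.2.2
  let t1 := fn.getD (i - 2) 0 + A.getD i 0
  let t2 := fn.getD (i - 3) 0 + A.getD i 0 + A.getD (i - 1) 0
  let ft := if t2 > t1 then (fn ++ [t2], tp ++ [true]) else (fn ++ [t1], tp ++ [false])
  let best' := if ft.1.getD i 0 > ft.1.getD best 0 then i else best
  (ft.1, ft.2, best')

lemma initA_eq (A : List Int) (hn : 3 ≤ A.length) :
    ((((List.replicate A.length (0 : Int)).set 0 0).set 1 (A.getD 1 0)).set 2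
        (A.getD 1 0 + A.getD 2 0),
      (((List.replicate A.length ([] : List Int)).set 0 [0]).set 1 [0, 1]).set 2 [0, 1, 2],
      (2 : Nat))
      = (fnArrA A A.length 3, gsArrA A A.length 3, pM A 2) := by
  refine Prod.ext ?_ (Prod.ext ?_ rfl)
  · apply List.ext_getElem
    · simp [fnArrA]
    · intro j h1 h2
      simp only [List.getElem_set, List.getElem_replicate, fnArrA, List.getElem_map,
        List.getElem_range]
      rcases j with _ | _ | _ | j
      · simp [pF]
      · simp [pF]
      · simp [pF]
      · split_ifs <;> first | rfl | omega
  · apply List.ext_getElem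
    · simp [gsArrA]
    · intro j h1 h2
      simp only [List.getElem_set, List.getElem_replicate, gsArrA, List.getElem_map,
        List.getElem_range]
      rcases j with _ | _ | _ | j
      · simp [pG]
      · simp [pG]
      · simp [pG]
      · split_ifs <;> first | rfl | omega

lemma loopA_inv (A : List Int) (hn : 3 ≤ A.length) :
    ∀ k, 3 ≤ k → k ≤ A.length →
      (PySem.List.pyRange 3 k).foldl (stepA A) (fnArrA A A.length 3, gsArrA A A.length 3, pM A 2)
        = (fnArrA A A.length k, gsArrA A A.length k, pM A (k - 1)) := by
  intro k hk3 hkn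
  induction k, hk3 using Nat.le_induction with
  | base => rw [PySem.List.pyRange_one_eq_nil (by norm_num)]; rfl
  | succ k hk3 ih =>
    have hkn' : k ≤ A.length := by omega
    have hkltn : k < A.length := by omega
    have hcast : ((k : Int)).toNat = k := by omega
    push_cast
    rw [PySem.List.pyRange_one_succ_right (by exact_mod_cast hk3),
      List.foldl_append, ih hkn']
    simp only [List.foldl, stepA, hcast]
    have h2 : k - 2 < k := by omega
    have h3 : k - 3 < k := by omega
    rw [fnArrA_getD A h2 (by omega), fnArrA_getD A h3 (by omega),
      gsArrA_getD A h2 (by omega), gsArrA_getD A h3 (by omega)]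
    have hpf := pF_succ3 A k (by omega)
    have hpm := pM_succ3 A k (by omega)
    have hmx : pM A (k - 1) < k := by
      have := pM_bounds A (k - 1); omega
    have hfl : pFlag A k
        = decide (pF A (k - 3) + A.getD k 0 + A.getD (k - 1) 0 > pF A (k - 2) + A.getD k 0) := by
      obtain ⟨m, rfl⟩ : ∃ m, k = m + 3 := ⟨k - 3, by omega⟩
      simp only [pFlag, Nat.add_sub_cancel, show m + 3 - 2 = m + 1 by omega,
        show m + 3 - 1 = m + 2 by omega]
    have hpg : pG A k
        = if pFlag A k then pG A (k - 3) ++ [((k : Nat) : Int) - 1, ((k : Nat) : Int)]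
          else pG A (k - 2) ++ [((k : Nat) : Int)] := by
      obtain ⟨m, rfl⟩ : ∃ m, k = m + 3 := ⟨k - 3, by omega⟩
      simp only [pG, Nat.add_sub_cancel, show m + 3 - 2 = m + 1 by omega]
      push_cast
      ring_nf
    by_cases hc : pF A (k - 3) + A.getD k 0 + A.getD (k - 1) 0 > pF A (k - 2) + A.getD k 0
    · have hfk : pF A k = pF A (k - 3) + A.getD k 0 + A.getD (k - 1) 0 := by
        rw [hpf, if_pos hc]
      have hgk : pG A k = pG A (k - 3) ++ [((k : Nat) : Int) - 1, ((k : Nat) : Int)] := by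
        rw [hpg, hfl, if_pos (decide_eq_true hc)]
      simp only [if_pos hc]
      rw [← hfk, ← hgk, fnArrA_set A hkltn, gsArrA_set A hkltn]
      refine Prod.ext rfl (Prod.ext rfl ?_)
      rw [fnArrA_getD A (by omega : pM A (k-1) < k + 1) (by omega),
        fnArrA_getD A (by omega : k < k + 1) (by omega), hpm]
    · have hfk : pF A k = pF A (k - 2) + A.getD k 0 := by
        rw [hpf, if_neg hc]
      have hgk : pG A k = pG A (k - 2) ++ [((k : Nat) : Int)] := by
        rw [hpg, hfl, if_neg (fun h => hc (of_decide_eq_true h))]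
      simp only [if_neg hc]
      rw [← hfk, ← hgk, fnArrA_set A hkltn, gsArrA_set A hkltn]
      refine Prod.ext rfl (Prod.ext rfl ?_)
      rw [fnArrA_getD A (by omega : pM A (k-1) < k + 1) (by omega),
        fnArrA_getD A (by omega : k < k + 1) (by omega), hpm]

-- B-side invariant
lemma loopB_inv (A : List Int) (hn : 3 ≤ A.length) :
    ∀ k, 3 ≤ k → k ≤ A.length →
      (PySem.List.pyRange 3 k).foldl (stepB A)
          ([0, A.getD 1 0, A.getD 1 0 + A.getD 2 0], [false, false, false], 2)
        = ((List.range k).map (pF A), (List.range k).map (pFlag A), pM A (k - 1)) := by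
  intro k hk3 hkn
  induction k, hk3 using Nat.le_induction with
  | base =>
    rw [PySem.List.pyRange_one_eq_nil (by norm_num)]
    simp [List.range_succ, pF, pFlag, pM]
  | succ k hk3 ih =>
    have hcast : ((k : Int)).toNat = k := by omega
    push_cast
    rw [PySem.List.pyRange_one_succ_right (by exact_mod_cast hk3),
      List.foldl_append, ih (by omega)]
    simp only [List.foldl, stepB, hcast]
    have h2 : k - 2 < k := by omega
    have h3 : k - 3 < k := by omega
    rw [PySem.List.getD_map_range (pF A) k (k - 2) 0 h2,
      PySem.List.getD_map_range (pF A) k (k - 3) 0 h3]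
    have hpf := pF_succ3 A k (by omega)
    have hpm := pM_succ3 A k (by omega)
    have hfl : pFlag A k
        = decide (pF A (k - 3) + A.getD k 0 + A.getD (k - 1) 0 > pF A (k - 2) + A.getD k 0) := by
      obtain ⟨m, rfl⟩ : ∃ m, k = m + 3 := ⟨k - 3, by omega⟩
      simp only [pFlag, Nat.add_sub_cancel, show m + 3 - 2 = m + 1 by omega,
        show m + 3 - 1 = m + 2 by omega]
    have hrange : (List.range (k + 1)).map (pF A) = (List.range k).map (pF A) ++ [pF A k] := by
      rw [List.range_succ, List.map_append]; rfl
    have hrangeF : (List.range (k + 1)).map (pFlag A)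
        = (List.range k).map (pFlag A) ++ [pFlag A k] := by
      rw [List.range_succ, List.map_append]; rfl
    have hmx : pM A (k - 1) < k := by have := pM_bounds A (k - 1); omega
    by_cases hc : pF A (k - 3) + A.getD k 0 + A.getD (k - 1) 0 > pF A (k - 2) + A.getD k 0
    · have hfk : pF A k = pF A (k - 3) + A.getD k 0 + A.getD (k - 1) 0 := by rw [hpf, if_pos hc]
      have hfkb : pFlag A k = true := by rw [hfl]; exact decide_eq_true hc
      simp only [if_pos hc]
      rw [← hfk, ← hrange]
      rw [show ((List.range k).map (pFlag A) ++ [true]) = (List.range (k + 1)).map (pFlag A) by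
        rw [hrangeF, hfkb]]
      refine Prod.ext rfl (Prod.ext rfl ?_)
      rw [PySem.List.getD_map_range (pF A) (k + 1) k 0 (by omega),
        PySem.List.getD_map_range (pF A) (k + 1) (pM A (k - 1)) 0 (by omega), hpm]
    · have hfk : pF A k = pF A (k - 2) + A.getD k 0 := by rw [hpf, if_neg hc]
      have hfkb : pFlag A k = false := by rw [hfl]; exact decide_eq_false hc
      simp only [if_neg hc]
      rw [← hfk, ← hrange]
      rw [show ((List.range k).map (pFlag A) ++ [false]) = (List.range (k + 1)).map (pFlag A) by
        rw [hrangeF, hfkb]]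
      refine Prod.ext rfl (Prod.ext rfl ?_)
      rw [PySem.List.getD_map_range (pF A) (k + 1) k 0 (by omega),
        PySem.List.getD_map_range (pF A) (k + 1) (pM A (k - 1)) 0 (by omega), hpm]

-- backtracking reconstructs pG
lemma backtrack_pG (A : List Int) (n : Nat) :
    ∀ i, i < n → ∀ rev,
      (([[0], [0, 1], [0, 1, 2]] : List (List Int)).getD
            (planPartyBacktrack ((List.range n).map (pFlag A)) i rev).1 [])
          ++ (planPartyBacktrack ((List.range n).map (pFlag A)) i rev).2.reverse
        = pG A i ++ rev.reverse := by
  intro i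
  induction i using Nat.strong_induction_on with
  | _ i ih =>
    intro hin rev
    by_cases h3 : 3 ≤ i
    · obtain ⟨m, rfl⟩ : ∃ m, i = m + 3 := ⟨i - 3, by omega⟩
      rw [planPartyBacktrack]
      rw [dif_pos h3, PySem.List.getD_map_range (pFlag A) n (m + 3) false hin]
      have e : ((m + 3 : Nat) : Int) - 1 = ((m + 2 : Nat) : Int) := by push_cast; ring
      by_cases hf : pFlag A (m + 3)
      · rw [if_pos hf, show m + 3 - 3 = m by omega, e]
        rw [ih m (by omega) (by omega) _]
        simp [pG, hf, List.reverse_append]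
      · rw [if_neg (by simp [hf]), show m + 3 - 2 = m + 1 by omega]
        rw [ih (m + 1) (by omega) (by omega) _]
        simp [pG, hf, List.reverse_append]
    · rw [planPartyBacktrack, dif_neg h3]
      interval_cases i <;> simp [pG]

lemma plan_party_alt_eq (A : List Int) (hn : 3 ≤ A.length) :
    plan_party_alt A = (pF A (pM A (A.length - 1)), pG A (pM A (A.length - 1))) := by
  have hmlt : pM A (A.length - 1) < A.length := by
    have := pM_bounds A (A.length - 1); omega
  have hloop := loopB_inv A hn A.length (by omega) le_rfl
  show (let st := (PySem.List.pyRange 3 A.length).foldl (stepB A)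
          ([0, A.getD 1 0, A.getD 1 0 + A.getD 2 0], [false, false, false], 2)
        let br := planPartyBacktrack st.2.1 st.2.2 []
        let base := ([[0], [0, 1], [0, 1, 2]] : List (List Int)).getD br.1 []
        (st.1.getD st.2.2 0, base ++ br.2.reverse)) = _
  rw [hloop]
  have hbt := backtrack_pG A A.length (pM A (A.length - 1)) hmlt []
  simp only [List.reverse_nil, List.append_nil] at hbt
  refine Prod.ext ?_ ?_
  · exact PySem.List.getD_map_range (pF A) A.length (pM A (A.length - 1)) 0 hmlt
  · exact hbt

lemma plan_party_eq' (A : List Int) (hn : 3 ≤ A.length) :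
    plan_party A = (pF A (pM A (A.length - 1)), pG A (pM A (A.length - 1))) := by
  have hmlt : pM A (A.length - 1) < A.length := by
    have := pM_bounds A (A.length - 1); omega
  have hloop := loopA_inv A hn A.length (by omega) le_rfl
  show (let st := (PySem.List.pyRange 3 A.length).foldl (stepA A)
          ((((List.replicate A.length (0 : Int)).set 0 0).set 1 (A.getD 1 0)).set 2
              (A.getD 1 0 + A.getD 2 0),
            (((List.replicate A.length ([] : List Int)).set 0 [0]).set 1 [0, 1]).set 2 [0, 1, 2],
            2)
        (st.1.getD st.2.2 0, st.2.1.getD st.2.2 [])) = _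
  rw [initA_eq A hn, hloop]
  refine Prod.ext ?_ ?_
  · exact fnArrA_getD A (by omega) hmlt
  · exact gsArrA_getD A (by omega) hmlt

-- ===== VERDICT (by name: the statement is the Claim_ definition above) =====
theorem plan_party_spec : Claim_equal_plan_party := by
  intro A _ hpre
  unfold Spec_plan_party
  rw [plan_party_eq' A hpre, plan_party_alt_eq A hpre]
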